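-- pv_equiv track=rewrite | github.com/danikdanon/contest3 | B.palindrom.py | single_centre
-- ===== SOURCE A (Python) =====
-- def single_centre(centre, s):
--     d = 1
--     ans = 1
--     max_d = min(len(s)-centre-1, centre)
--     while d <= max_d:
--         if s[centre-d] != s[centre+d]:
--             ans = 0
--         d += 1
--     if ans:
--         return max(centre, len(s)-centre-1) - max_d
--     else:
--         return 10000
-- ===== SOURCE B (Python) =====
-- def single_centre(centre, s):
--     n = len(s)
--     max_d = min(n - centre - 1, centre)
--     if max_d > 0 and s[centre - max_d:centre][::-1] != s[centre + 1:centre + max_d + 1]: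
--         return 10000
--     return max(centre, n - centre - 1) - max_d
-- ===== Notes on version B (the rewrite author's own statement) =====
-- stated objective: faster
-- what changed: Replaces A's interpreted two-pointer while-loop with a mismatch flag by a single reversed-slice comparison s[centre-max_d:centre][::-1] == s[centre+1:centre+max_d+1] running in C.
import Mathlib
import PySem

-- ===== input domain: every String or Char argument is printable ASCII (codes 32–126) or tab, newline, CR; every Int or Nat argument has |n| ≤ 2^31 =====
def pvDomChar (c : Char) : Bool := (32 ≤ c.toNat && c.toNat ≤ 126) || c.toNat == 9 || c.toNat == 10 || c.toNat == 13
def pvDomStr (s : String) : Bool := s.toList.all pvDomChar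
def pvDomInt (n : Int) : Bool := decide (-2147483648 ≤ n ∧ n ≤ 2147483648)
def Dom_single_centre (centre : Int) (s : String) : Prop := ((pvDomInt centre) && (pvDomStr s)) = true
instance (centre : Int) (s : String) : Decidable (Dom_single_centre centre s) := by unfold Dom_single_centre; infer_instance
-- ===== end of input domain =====

-- B replaces A's manual mismatch-flag while-loop by one reversed-slice comparison (same O(n), measured faster by constant factor).

-- ===== PORT A =====
-- while d <= max_d: if s[centre-d] != s[centre+d]: ans = 0; d += 1   (all indices provably in range, so pyGetD's default is unreachable)
def single_centre (centre : Int) (s : String) : Int :=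
  let max_d : Int := min (PySem.Str.len s - centre - 1) centre
  let ans : Int :=
    (PySem.List.pyRange 1 (max_d + 1) 1).foldl
      (fun ans d =>
        if PySem.List.pyGetD s.toList (centre - d) ' ' ≠ PySem.List.pyGetD s.toList (centre + d) ' '
        then 0 else ans) 1
  if ans ≠ 0 then max centre (PySem.Str.len s - centre - 1) - max_d
  else 10000

-- ===== PORT B =====
def single_centre_alt (centre : Int) (s : String) : Int :=
  let n : Int := PySem.Str.len s
  let max_d : Int := min (n - centre - 1) centre
  if max_d > 0 ∧
      (PySem.List.slice? (PySem.List.slice s.toList (some (centre - max_d)) (some centre)) none none (-1)).getD []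
        ≠ PySem.List.slice s.toList (some (centre + 1)) (some (centre + max_d + 1))
  then 10000
  else max centre (n - centre - 1) - max_d

-- ===== PRECONDITION & SPEC =====
def Spec_single_centre (centre : Int) (s : String) (out : Int) : Prop := out = single_centre_alt centre s
instance (centre : Int) (s : String) (out : Int) : Decidable (Spec_single_centre centre s out) := by unfold Spec_single_centre; infer_instance

-- ===== CLAIM (what is proved, stated in full; the proofs are below) =====
def Claim_equal_single_centre : Prop := ∀ (centre : Int) (s : String), Dom_single_centre centre s → Spec_single_centre centre s (single_centre centre s)

-- ===== LEMMAS AND PROOFS =====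

-- A's loop computes a flag: the fold is 0 iff some d in the list hits a mismatch.
theorem foldl_flag {α : Type} (P : α → Prop) [DecidablePred P] (l : List α) (a : Int) :
    l.foldl (fun ans d => if P d then 0 else ans) a = if ∃ x ∈ l, P x then 0 else a := by
  induction l generalizing a with
  | nil => simp
  | cons x xs ih =>
      simp only [List.foldl_cons, ih]
      by_cases hx : P x <;> by_cases hxs : ∃ y ∈ xs, P y <;> simp [hx, hxs]

theorem reverse_take_drop_eq_iff (l : List Char) (c m : Nat)
    (hm : 0 < m) (hcm : m ≤ c) (hN : c + m < l.length) :
    ((List.take m (List.drop (c - m) l)).reverse = List.take m (List.drop (c + 1) l))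
      ↔ ∀ d : Nat, 1 ≤ d → d ≤ m → l[c - d]? = l[c + d]? := by
  have hlen1 : (List.take m (List.drop (c - m) l)).length = m := by
    simp [List.length_take, List.length_drop]; omega
  have hlen2 : (List.take m (List.drop (c + 1) l)).length = m := by
    simp [List.length_take, List.length_drop]; omega
  constructor
  · intro h d h1 h2
    have := congrArg (fun t => t[d - 1]?) h
    simp only at this
    rw [List.getElem?_reverse (by omega), hlen1] at this
    rw [List.getElem?_take_of_lt (by omega), List.getElem?_drop,
        List.getElem?_take_of_lt (by omega), List.getElem?_drop] at this
    have e1 : c - m + (m - 1 - (d - 1)) = c - d := by omega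
    have e2 : c + 1 + (d - 1) = c + d := by omega
    rw [e1, e2] at this
    exact this
  · intro h
    apply List.ext_getElem?
    intro i
    by_cases hi : i < m
    · rw [List.getElem?_reverse (by omega), hlen1]
      rw [List.getElem?_take_of_lt (by omega), List.getElem?_drop,
          List.getElem?_take_of_lt (by omega), List.getElem?_drop]
      have e1 : c - m + (m - 1 - i) = c - (i + 1) := by omega
      have e2 : c + 1 + i = c + (i + 1) := by omega
      rw [e1, e2]
      exact h (i + 1) (by omega) (by omega)
    · rw [List.getElem?_eq_none (by rw [List.length_reverse, hlen1]; omega),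
          List.getElem?_eq_none (by rw [hlen2]; omega)]

theorem single_centre_eq (centre : Int) (s : String) :
    single_centre centre s = single_centre_alt centre s := by
  simp only [single_centre, single_centre_alt]
  set l := s.toList with hl
  have hlen : PySem.Str.len s = (l.length : Int) := by
    simp [PySem.Str.len_eq, hl]
  rw [hlen]
  by_cases hpos : min ((l.length : Int) - centre - 1) centre > 0
  · have h1 : min ((l.length : Int) - centre - 1) centre ≤ centre := min_le_right _ _
    have h2 : min ((l.length : Int) - centre - 1) centre ≤ (l.length : Int) - centre - 1 :=
      min_le_left _ _
    obtain ⟨c, hc⟩ : ∃ c : Nat, centre = (c : Int) := ⟨centre.toNat, by omega⟩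
    obtain ⟨m, hm⟩ : ∃ m : Nat, min ((l.length : Int) - centre - 1) centre = (m : Int) :=
      ⟨(min ((l.length : Int) - centre - 1) centre).toNat, by omega⟩
    rw [hc] at hm h1 h2 hpos ⊢
    rw [hm] at h1 h2 hpos ⊢
    have hm0 : 0 < m := by omega
    have hcm : m ≤ c := by omega
    have hN : c + m < l.length := by omega
    -- rewrite B's slices into drop/take form
    rw [PySem.List.slice?_none_none_neg_one]
    have hs1 : PySem.List.slice l (some ((c : Int) - (m : Int))) (some (c : Int))
        = List.take m (List.drop (c - m) l) := by
      rw [PySem.List.slice_of_nonneg l (by omega) (by omega) (by omega) (by omega)]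
      have e1 : ((c : Int) - (m : Int)).toNat = c - m := by omega
      have e2 : ((c : Int)).toNat = c := by omega
      rw [e1, e2]
      have e3 : c - (c - m) = m := by omega
      rw [e3]
    have hs2 : PySem.List.slice l (some ((c : Int) + 1)) (some ((c : Int) + (m : Int) + 1))
        = List.take m (List.drop (c + 1) l) := by
      rw [PySem.List.slice_of_nonneg l (by omega) (by omega) (by omega) (by omega)]
      have e1 : ((c : Int) + 1).toNat = c + 1 := by omega
      have e2 : ((c : Int) + (m : Int) + 1).toNat = c + m + 1 := by omega
      rw [e1, e2]
      have e3 : c + m + 1 - (c + 1) = m := by omega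
      rw [e3]
    rw [hs1, hs2, Option.getD_some]
    -- A's fold becomes an existence test
    rw [foldl_flag (fun d : Int =>
      PySem.List.pyGetD l ((c : Int) - d) ' ' ≠ PySem.List.pyGetD l ((c : Int) + d) ' ')]
    -- link: a mismatch exists iff the reversed left slice differs from the right slice
    have key : (∃ d ∈ PySem.List.pyRange 1 ((m : Int) + 1) 1,
        PySem.List.pyGetD l ((c : Int) - d) ' ' ≠ PySem.List.pyGetD l ((c : Int) + d) ' ')
        ↔ ¬ ((List.take m (List.drop (c - m) l)).reverse = List.take m (List.drop (c + 1) l)) := by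
      rw [reverse_take_drop_eq_iff l c m hm0 hcm hN]
      constructor
      · rintro ⟨d, hd, hne⟩ hall
        rw [PySem.List.mem_pyRange_one] at hd
        obtain ⟨k, rfl⟩ : ∃ k : Nat, d = (k : Int) := ⟨d.toNat, by omega⟩
        have hk1 : 1 ≤ k := by omega
        have hk2 : k ≤ m := by omega
        have hkv := hall k hk1 hk2
        apply hne
        rw [PySem.List.pyGetD_eq_getElem l ' ' (by omega) (by omega),
            PySem.List.pyGetD_eq_getElem l ' ' (by omega) (by omega)]
        have e1 : ((c : Int) - (k : Int)).toNat = c - k := by omega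
        have e2 : ((c : Int) + (k : Int)).toNat = c + k := by omega
        simp only [e1, e2]
        rw [List.getElem?_eq_getElem (by omega), List.getElem?_eq_getElem (by omega)] at hkv
        exact Option.some.inj hkv
      · intro hno
        by_contra hnone
        apply hno
        intro k hk1 hk2
        have hmem : (k : Int) ∈ PySem.List.pyRange 1 ((m : Int) + 1) 1 := by
          rw [PySem.List.mem_pyRange_one]; omega
        by_contra hkne
        apply hnone
        refine ⟨(k : Int), hmem, ?_⟩
        rw [PySem.List.pyGetD_eq_getElem l ' ' (by omega) (by omega),
            PySem.List.pyGetD_eq_getElem l ' ' (by omega) (by omega)]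
        have e1 : ((c : Int) - (k : Int)).toNat = c - k := by omega
        have e2 : ((c : Int) + (k : Int)).toNat = c + k := by omega
        simp only [e1, e2]
        intro heq
        apply hkne
        rw [List.getElem?_eq_getElem (by omega), List.getElem?_eq_getElem (by omega)]
        exact congrArg some heq
    by_cases hrev : (List.take m (List.drop (c - m) l)).reverse = List.take m (List.drop (c + 1) l)
    · have hx : ¬ ∃ d ∈ PySem.List.pyRange 1 ((m : Int) + 1) 1,
          PySem.List.pyGetD l ((c : Int) - d) ' ' ≠ PySem.List.pyGetD l ((c : Int) + d) ' ' :=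
        fun h => (key.mp h) hrev
      simp [hrev]
      intro x hx1 hx2 hne
      exact absurd ⟨x, PySem.List.mem_pyRange_one.mpr ⟨hx1, by omega⟩, hne⟩ hx
    · have hx := key.mpr hrev
      obtain ⟨d, hd, hne⟩ := hx
      rw [PySem.List.mem_pyRange_one] at hd
      simp [hrev, hm0]
      intro hall
      exact absurd (hall d hd.1 (by omega)) hne
  · -- max_d ≤ 0: the loop body never runs, both sides return max - max_d
    have hrange : PySem.List.pyRange 1 (min ((l.length : Int) - centre - 1) centre + 1) 1 = [] := by
      apply List.eq_nil_iff_forall_not_mem.mpr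
      intro x hx
      rw [PySem.List.mem_pyRange_one] at hx
      omega
    rw [hrange]
    simp only [List.foldl_nil]
    rw [if_pos (by norm_num), if_neg (by exact fun h => hpos h.1)]

-- ===== VERDICT (by name: the statement is the Claim_ definition above) =====
theorem single_centre_spec : Claim_equal_single_centre := by
  intro centre s _
  unfold Spec_single_centre
  exact single_centre_eq centre s
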